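-- pv_equiv track=rewrite | github.com/jihun-eu/algorithm | baekjoon/python/bronze/bronze4/2530.py | time_seperator
-- ===== SOURCE A (Python) =====
-- def time_seperator(timer):
--     reg_t = [0] * 3
--
--     for i, n in enumerate([3600, 60, 1]):
--         reg_t[i] = timer // n
--         timer %= n
--         if i == 0:
--             reg_t[i] %= 24
--     return reg_t
-- ===== SOURCE B (Python) =====
-- def time_seperator(timer):
--     return [timer // 3600 % 24, timer // 60 % 60, timer % 60]
-- ===== Notes on version B (the rewrite author's own statement) =====
-- stated objective: simpler
-- what changed: Replaces the stateful carry loop (mutable 3-slot list, running remainder, special-case branch for the hours slot) with a single list literal of three independent closed-form floor-division/modulo expressions.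
import Mathlib
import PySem

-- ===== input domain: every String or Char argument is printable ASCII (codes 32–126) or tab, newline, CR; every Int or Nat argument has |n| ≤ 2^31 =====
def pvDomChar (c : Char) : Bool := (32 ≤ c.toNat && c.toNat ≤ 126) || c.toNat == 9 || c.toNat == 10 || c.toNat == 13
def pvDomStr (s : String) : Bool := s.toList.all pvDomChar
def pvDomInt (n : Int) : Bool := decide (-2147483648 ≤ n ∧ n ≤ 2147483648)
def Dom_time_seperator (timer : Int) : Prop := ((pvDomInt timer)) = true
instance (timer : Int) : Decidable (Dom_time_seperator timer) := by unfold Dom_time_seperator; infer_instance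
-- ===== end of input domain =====

-- ===== PORT A =====
-- B: three independent closed-form div/mod expressions instead of A's carry loop (objective: simpler).
def time_seperator (timer : Int) : List Int :=
  Prod.fst <|
    -- enumerate([3600, 60, 1]) written out as literal (index, value) pairs
    ([((0:Nat), (3600:Int)), (1, 60), (2, 1)]).foldl
      (fun (st : List Int × Int) p =>
        let reg_t := st.1.set p.1 (PySem.Int.floordiv st.2 p.2)
        let t := PySem.Int.mod st.2 p.2
        let reg_t := if p.1 == 0 then reg_t.set p.1 (PySem.Int.mod (reg_t.getD p.1 0) 24) else reg_t
        (reg_t, t))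
      (List.replicate 3 0, timer)

-- ===== PORT B =====
def time_seperator_alt (timer : Int) : List Int :=
  [PySem.Int.mod (PySem.Int.floordiv timer 3600) 24,
   PySem.Int.mod (PySem.Int.floordiv timer 60) 60,
   PySem.Int.mod timer 60]

-- ===== PRECONDITION & SPEC =====
def Spec_time_seperator (timer : Int) (out : List Int) : Prop := out = time_seperator_alt timer
instance (timer : Int) (out : List Int) : Decidable (Spec_time_seperator timer out) := by unfold Spec_time_seperator; infer_instance

-- ===== CLAIM (what is proved, stated in full; the proofs are below) =====
def Claim_equal_time_seperator : Prop := ∀ (timer : Int), Dom_time_seperator timer → Spec_time_seperator timer (time_seperator timer)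

-- ===== LEMMAS AND PROOFS =====

-- ===== VERDICT (by name: the statement is the Claim_ definition above) =====
theorem time_seperator_spec : Claim_equal_time_seperator := by
  intro timer _
  unfold Spec_time_seperator time_seperator time_seperator_alt
  simp only [List.foldl, List.replicate, List.set, beq_iff_eq, if_true, List.getD,
    List.getElem?_cons_zero, Option.getD_some]
  simp only [PySem.Int.floordiv_eq_ediv_of_pos (by omega : (0:Int) < 3600),
    PySem.Int.floordiv_eq_ediv_of_pos (by omega : (0:Int) < 60),
    PySem.Int.floordiv_eq_ediv_of_pos (by omega : (0:Int) < 1),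
    PySem.Int.mod_eq_emod_of_pos (by omega : (0:Int) < 3600),
    PySem.Int.mod_eq_emod_of_pos (by omega : (0:Int) < 60),
    PySem.Int.mod_eq_emod_of_pos (by omega : (0:Int) < 24)]
  refine List.ext_getElem (by simp) ?_
  intro i h1 h2
  have hi : i < 3 := by simpa using h2
  rcases i with _ | _ | _ | i <;> first | omega | (simp; try omega)
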